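-- pv_equiv track=rewrite | github.com/NormPlum/freeCodeCamp_DailyCodingChallenges | 240.py | palindrome_locator
-- ===== SOURCE A (Python) =====
-- def palindrome_locator(s):
--     half = int(len(s) / 2)
--     first = s[:half]
--     second = s[-half:]
--
--     for i in range(len(first)):
--         if first[i] != second[-(i+1)]:
--             return "none"
--
--     if len(s) / 2 == half:
--         return s[half-1:][:2]
--     else:
--         return s[half:][0]
-- ===== SOURCE B (Python) =====
-- def palindrome_locator(s):
--     if s != s[::-1]:
--         return "none"
--     half = len(s) // 2
--     if len(s) % 2 == 0:
--         return s[half-1:half+1]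
--     return s[half]
-- ===== Notes on version B (the rewrite author's own statement) =====
-- stated objective: idiomatic
-- what changed: B checks the palindrome by the whole-string reversal comparison s != s[::-1] (C-level slicing/compare) instead of A's Python-level index loop over the two half slices, and returns the middle by a single two-sided slice / direct index instead of A's chained slices.
import Mathlib
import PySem

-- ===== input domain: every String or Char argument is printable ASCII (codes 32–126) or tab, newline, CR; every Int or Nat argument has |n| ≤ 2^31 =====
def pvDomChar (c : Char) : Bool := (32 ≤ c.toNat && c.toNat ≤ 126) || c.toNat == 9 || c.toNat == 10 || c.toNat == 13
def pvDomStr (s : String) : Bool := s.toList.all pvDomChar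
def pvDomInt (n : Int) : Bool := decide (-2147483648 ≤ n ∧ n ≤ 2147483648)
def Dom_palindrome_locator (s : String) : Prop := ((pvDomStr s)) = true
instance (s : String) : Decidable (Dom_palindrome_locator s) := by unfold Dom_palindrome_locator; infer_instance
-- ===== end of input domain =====

-- B replaces A's index loop over the two half slices by the whole-string reversal
-- comparison and returns the middle via one two-sided slice / direct index (idiomatic).

-- ===== PORT A =====
-- the 'for i in range(len(first)): if first[i] != second[-(i+1)]: return "none"' loop:
-- early-exit mismatch search, rendered as List.all over the same range
def palA_check (first second : List Char) : Bool :=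
  (PySem.List.pyRange 0 (first.length : Int) 1).all fun i =>
    PySem.List.pyGet? first i == PySem.List.pyGet? second (-(i + 1))

def palindrome_locator (s : String) : String :=
  let l := s.toList
  let half : Nat := l.length / 2        -- int(len(s)/2) = len(s)//2 for a nonnegative length
  let first := PySem.List.slice l none (some (half : Int))
  let second := PySem.List.slice l (some (-(half : Int))) none
  if palA_check first second then
    if l.length % 2 == 0 then           -- 'len(s)/2 == half' (float test) holds iff len(s) is even
      String.ofList (PySem.List.slice (PySem.List.slice l (some ((half : Int) - 1)) none) none (some 2))
    else
      -- s[half:][0]: always in range here (odd length ≥ 1), so the none arm is unreachable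
      match PySem.List.pyGet? (PySem.List.slice l (some (half : Int)) none) 0 with
      | some c => String.ofList [c]
      | none => ""
  else "none"

-- ===== PORT B =====
def palindrome_locator_alt (s : String) : String :=
  let l := s.toList
  if l ≠ l.reverse then "none"          -- s != s[::-1]
  else
    let half : Nat := l.length / 2
    if l.length % 2 == 0 then
      String.ofList (PySem.List.slice l (some ((half : Int) - 1)) (some ((half : Int) + 1)))
    else
      match PySem.List.pyGet? l (half : Int) with
      | some c => String.ofList [c]
      | none => ""

-- ===== PRECONDITION & SPEC =====
def Spec_palindrome_locator (s : String) (out : String) : Prop := out = palindrome_locator_alt s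
instance (s : String) (out : String) : Decidable (Spec_palindrome_locator s out) := by unfold Spec_palindrome_locator; infer_instance

-- ===== CLAIM (what is proved, stated in full; the proofs are below) =====
def Claim_equal_palindrome_locator : Prop := ∀ (s : String), Dom_palindrome_locator s → Spec_palindrome_locator s (palindrome_locator s)

-- ===== LEMMAS AND PROOFS =====

-- symmetric-pair characterisation of a palindrome, only the first half of the indices needed
lemma pal_iff_half (l : List Char) :
    l = l.reverse ↔ ∀ i < l.length / 2, l[i]? = l[l.length - 1 - i]? := by
  constructor
  · intro h i hi
    conv_lhs => rw [h]
    rw [List.getElem?_reverse (by omega)]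
  · intro h
    apply List.ext_getElem?
    intro i
    by_cases hi : i < l.length
    · conv_rhs => rw [List.getElem?_reverse hi]
      rcases lt_or_ge i (l.length / 2) with hc | hc
      · exact h i hc
      · rcases lt_or_ge (l.length - 1 - i) (l.length / 2) with hc2 | hc2
        · have h2 := (h (l.length - 1 - i) hc2).symm
          rw [show l.length - 1 - (l.length - 1 - i) = i by omega] at h2
          exact h2
        · congr 1
          omega
    · rw [List.getElem?_eq_none (by omega), List.getElem?_eq_none (by simp; omega)]

-- A's loop succeeds iff every symmetric pair in the half slices matches
lemma check_iff (l : List Char) :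
    palA_check (PySem.List.slice l none (some ((l.length / 2 : Nat) : Int)))
        (PySem.List.slice l (some (-((l.length / 2 : Nat) : Int))) none) = true
      ↔ ∀ i < l.length / 2, l[i]? = l[l.length - 1 - i]? := by
  rcases Nat.eq_zero_or_pos (l.length / 2) with h0 | hpos
  · rw [h0]
    simp [palA_check]
  · rw [PySem.List.slice_to_natCast, PySem.List.slice_from_neg_natCast l _ hpos]
    have hlt : (l.take (l.length / 2)).length = l.length / 2 := by
      simp; omega
    have hdl : (l.drop (l.length - l.length / 2)).length = l.length / 2 := by
      simp; omega
    unfold palA_check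
    rw [hlt, PySem.List.pyRange_zero_natCast, List.all_map, List.all_eq_true]
    have key : ∀ i : Nat, i < l.length / 2 →
        ((PySem.List.pyGet? (l.take (l.length / 2)) ((i : Int)) ==
          PySem.List.pyGet? (l.drop (l.length - l.length / 2)) (-((i : Int) + 1))) = true
         ↔ l[i]? = l[l.length - 1 - i]?) := by
      intro i hi
      rw [show (-((i : Int) + 1)) = -(((i + 1 : Nat) : Int)) by push_cast; ring]
      rw [PySem.List.pyGet?_natCast,
          PySem.List.pyGet?_neg_natCast _ (i + 1) (by omega) (by rw [hdl]; omega)]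
      rw [hdl, List.getElem?_take, List.getElem?_drop]
      rw [if_pos hi, show l.length - l.length / 2 + (l.length / 2 - (i + 1)) = l.length - 1 - i by omega]
      exact beq_iff_eq
    constructor
    · intro h i hi
      exact (key i hi).mp (h i (List.mem_range.mpr hi))
    · intro h i hi
      exact (key i (List.mem_range.mp hi)).mpr (h i (List.mem_range.mp hi))

-- the two middle-extraction branches agree once the palindrome test has passed
lemma main_eq (l : List Char) : palindrome_locator (String.ofList l) = palindrome_locator_alt (String.ofList l) := by
  simp only [palindrome_locator, palindrome_locator_alt, String.toList_ofList]
  by_cases hp : l = l.reverse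
  · have hc : palA_check (PySem.List.slice l none (some ((l.length / 2 : Nat) : Int)))
        (PySem.List.slice l (some (-((l.length / 2 : Nat) : Int))) none) = true :=
      (check_iff l).mpr ((pal_iff_half l).mp hp)
    rw [if_pos hc, if_neg (not_not_intro hp)]
    by_cases he : l.length % 2 = 0
    · rw [if_pos (by simp [he]), if_pos (by simp [he])]
      rcases Nat.eq_zero_or_pos (l.length / 2) with h0 | hpos
      · have hnil : l = [] := by
          rw [List.eq_nil_iff_length_eq_zero]
          omega
        subst hnil
        rfl
      · rw [show ((l.length / 2 : Nat) : Int) - 1 = ((l.length / 2 - 1 : Nat) : Int) by omega,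
            show ((l.length / 2 : Nat) : Int) + 1 = ((l.length / 2 + 1 : Nat) : Int) by omega,
            PySem.List.slice_from_natCast, PySem.List.slice_to _ (by norm_num), PySem.List.slice_natCast,
            show l.length / 2 + 1 - (l.length / 2 - 1) = 2 by omega]
        rfl
    · rw [if_neg (by simp [he]), if_neg (by simp [he])]
      rw [PySem.List.slice_from_natCast, PySem.List.pyGet?_zero, List.getElem?_drop,
          Nat.add_zero, PySem.List.pyGet?_natCast]
  · have hc : ¬ palA_check (PySem.List.slice l none (some ((l.length / 2 : Nat) : Int)))
        (PySem.List.slice l (some (-((l.length / 2 : Nat) : Int))) none) = true :=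
      fun h => hp ((pal_iff_half l).mpr ((check_iff l).mp h))
    rw [if_neg hc, if_pos hp]

-- ===== VERDICT (by name: the statement is the Claim_ definition above) =====
theorem palindrome_locator_spec : Claim_equal_palindrome_locator := by
  intro s _
  unfold Spec_palindrome_locator
  have h := main_eq s.toList
  rwa [String.ofList_toList] at h
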